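-- pv_equiv track=rewrite | github.com/graceeputnam/learning_python | homework5d/group_csv.py | group_em
-- ===== SOURCE A (Python) =====
-- def group_em(lines, keys, items):
--     new = {}
--     key = int(keys)
--     item = int(items)
--     for line in lines:
--         new_line = line.split(",")
--         if new_line[key] not in new:
--             new[new_line[key]] = []
--         if new_line[key] in new:
--             new[new_line[key]].append(new_line[item])
--     return new
-- ===== SOURCE B (Python) =====
-- def group_em(lines, keys, items):
--     key = int(keys)
--     item = int(items)
--     rows = [line.split(",") for line in lines]
--     return {r[key]: [s[item] for s in rows if s[key] == r[key]] for r in rows}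
-- ===== Notes on version B (the rewrite author's own statement) =====
-- stated objective: alternative
-- what changed: Replaces A's incremental dict-of-lists build (conditional empty-entry insert then append per line) by a dict comprehension over pre-split rows that, for each row's key, collects the whole group at once with a filtering list comprehension.
import Mathlib
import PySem

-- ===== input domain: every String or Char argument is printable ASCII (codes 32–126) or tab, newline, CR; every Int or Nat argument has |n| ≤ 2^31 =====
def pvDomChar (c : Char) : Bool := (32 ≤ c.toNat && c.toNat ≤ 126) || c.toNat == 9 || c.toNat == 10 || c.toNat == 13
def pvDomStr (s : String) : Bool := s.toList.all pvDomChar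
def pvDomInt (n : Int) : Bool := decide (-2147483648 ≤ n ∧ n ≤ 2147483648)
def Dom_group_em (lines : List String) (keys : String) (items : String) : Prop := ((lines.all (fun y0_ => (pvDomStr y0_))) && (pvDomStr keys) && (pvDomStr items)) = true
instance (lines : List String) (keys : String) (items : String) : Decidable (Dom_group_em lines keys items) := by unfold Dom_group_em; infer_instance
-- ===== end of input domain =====

-- B builds the same grouping with a dict comprehension over pre-split rows, collecting each
-- key's whole item list at once by filtering, instead of A's incremental insert-then-append.

-- ===== PORT A =====
def group_em (lines : List String) (keys : String) (items : String) : List (String × List String) :=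
  let key := (PySem.Int.ofStr? keys).getD 0
  let item := (PySem.Int.ofStr? items).getD 0
  (lines.foldl (fun (new : PySem.Dict String (List String)) line =>
      let new_line := (PySem.Str.split? line ",").getD []
      let k := PySem.List.pyGetD new_line key ""
      let new := if new.contains k then new else new.insert k []
      if new.contains k then
        new.modify k [] (fun l => l ++ [PySem.List.pyGetD new_line item ""])
      else new)
    PySem.Dict.empty).items

-- ===== PORT B =====
def group_em_alt (lines : List String) (keys : String) (items : String) : List (String × List String) :=
  let key := (PySem.Int.ofStr? keys).getD 0
  let item := (PySem.Int.ofStr? items).getD 0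
  let rows := lines.map (fun line => (PySem.Str.split? line ",").getD [])
  (rows.foldl (fun (out : PySem.Dict String (List String)) r =>
      out.insert (PySem.List.pyGetD r key "")
        ((rows.filter (fun s => PySem.List.pyGetD s key "" == PySem.List.pyGetD r key "")).map
          (fun s => PySem.List.pyGetD s item "")))
    PySem.Dict.empty).items

-- ===== PRECONDITION & SPEC =====
-- Pre_ excludes exactly the inputs on which the Python A raises: keys/items not parseable by
-- int() (ValueError), or some line whose split has too few fields for the requested index (IndexError).
def Pre_group_em (lines : List String) (keys : String) (items : String) : Prop :=
  (PySem.Int.ofStr? keys).isSome = true ∧ (PySem.Int.ofStr? items).isSome = true ∧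
  ∀ line ∈ lines,
    PySem.Raise.InRange ((PySem.Str.split? line ",").getD []).length ((PySem.Int.ofStr? keys).getD 0) ∧
    PySem.Raise.InRange ((PySem.Str.split? line ",").getD []).length ((PySem.Int.ofStr? items).getD 0)
instance (lines : List String) (keys : String) (items : String) : Decidable (Pre_group_em lines keys items) := by unfold Pre_group_em; infer_instance

def pvWitness_group_em : List String × String × String := (["a,1", "b,2", "a,3"], "0", "1")

def Spec_group_em (lines : List String) (keys : String) (items : String) (out : List (String × List String)) : Prop := out = group_em_alt lines keys items
instance (lines : List String) (keys : String) (items : String) (out : List (String × List String)) : Decidable (Spec_group_em lines keys items out) := by unfold Spec_group_em; infer_instance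

-- ===== CLAIM (what is proved, stated in full; the proofs are below) =====
def Claim_equal_group_em : Prop := ∀ (lines : List String) (keys : String) (items : String), Dom_group_em lines keys items → Pre_group_em lines keys items → Spec_group_em lines keys items (group_em lines keys items)

-- ===== LEMMAS AND PROOFS =====

theorem pv_witness_ok : Dom_group_em (pvWitness_group_em.1) (pvWitness_group_em.2.1) (pvWitness_group_em.2.2) ∧ Pre_group_em (pvWitness_group_em.1) (pvWitness_group_em.2.1) (pvWitness_group_em.2.2) := by
  decide

-- A's per-line step (conditional empty insert, then guaranteed append) is one modify.
theorem pv_stepA_eq_modify (d : PySem.Dict String (List String)) (k : String) (it : String) :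
    (let d' := if d.contains k then d else d.insert k []
     if d'.contains k then d'.modify k [] (fun l => l ++ [it]) else d') =
    d.modify k [] (fun l => l ++ [it]) := by
  by_cases h : d.contains k = true
  · simp [h]
  · have hc : d.contains k = false := by simpa using h
    simp only [hc, Bool.false_eq_true, if_false, PySem.Dict.contains_insert_self, if_true,
      PySem.Dict.modify, PySem.Dict.getD_insert_self, PySem.Dict.insert_insert_self,
      PySem.Dict.getD_of_not_contains d [] hc]

-- getD after a foldl of inserts whose value is a function of the key only
theorem pv_getD_foldl_insert_keyfn {ρ : Type} (l : List ρ) (kf : ρ → String)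
    (V : String → List String) (d : PySem.Dict String (List String)) (c : String) :
    (l.foldl (fun d r => d.insert (kf r) (V (kf r))) d).getD c [] =
      if c ∈ l.map kf then V c else d.getD c [] := by
  induction l generalizing d with
  | nil => simp
  | cons r t ih =>
    simp only [List.foldl_cons, ih, List.map_cons, List.mem_cons]
    by_cases h1 : c ∈ t.map kf
    · simp [h1]
    · by_cases h2 : c = kf r
      · simp [h2, PySem.Dict.getD_insert_self]
      · simp [h1, h2, PySem.Dict.getD_insert_of_ne _ _ _ h2]

-- core: the modify-grouping fold and the insert-whole-group fold have the same items
theorem pv_items_eq (kf vf : List String → String) (rows : List (List String)) :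
    (rows.foldl (fun (d : PySem.Dict String (List String)) r =>
        d.modify (kf r) [] (fun l => l ++ [vf r])) PySem.Dict.empty).items =
    (rows.foldl (fun (out : PySem.Dict String (List String)) r =>
        out.insert (kf r) ((rows.filter (fun s => kf s == kf r)).map vf)) PySem.Dict.empty).items := by
  have hnA := PySem.Dict.nodup_keys_foldl_modify_key rows kf []
      (fun _ r => fun l => l ++ [vf r]) PySem.Dict.empty (by simp)
  have hnB := PySem.Dict.nodup_keys_foldl_insert_key rows kf
      (fun _ r => (rows.filter (fun s => kf s == kf r)).map vf) PySem.Dict.empty (by simp)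
  rw [PySem.Dict.items_eq_map_keys _ hnA [], PySem.Dict.items_eq_map_keys _ hnB [],
    PySem.Dict.keys_foldl_modify_key rows kf [] (fun _ r => fun l => l ++ [vf r]) PySem.Dict.empty,
    PySem.Dict.keys_foldl_insert_key rows kf
      (fun _ r => (rows.filter (fun s => kf s == kf r)).map vf) PySem.Dict.empty]
  apply List.map_congr_left
  intro c hc
  have hmem : c ∈ rows.map kf := by
    simpa [PySem.Dict.keys_empty, PySem.Set.mem_update] using hc
  have hA : (rows.foldl (fun (d : PySem.Dict String (List String)) r =>
        d.modify (kf r) [] (fun l => l ++ [vf r])) PySem.Dict.empty).getD c [] =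
      (rows.filter (fun s => kf s == c)).map vf := by
    have h1 : (rows.foldl (fun (d : PySem.Dict String (List String)) r =>
          d.modify (kf r) [] (fun l => l ++ [vf r])) PySem.Dict.empty) =
        ((rows.map (fun r => (kf r, vf r))).foldl
          (fun d p => d.modify p.1 [] (fun l => l ++ [p.2])) PySem.Dict.empty) := by
      rw [List.foldl_map]
    rw [h1, PySem.Dict.getD_foldl_modify_append]
    simp [List.filter_map, Function.comp_def]
  have hB : (rows.foldl (fun (out : PySem.Dict String (List String)) r =>
        out.insert (kf r) ((rows.filter (fun s => kf s == kf r)).map vf)) PySem.Dict.empty).getD c [] =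
      (rows.filter (fun s => kf s == c)).map vf := by
    rw [pv_getD_foldl_insert_keyfn rows kf
      (fun c => (rows.filter (fun s => kf s == c)).map vf) PySem.Dict.empty c]
    simp [hmem]
  rw [hA, hB]

-- ===== VERDICT (by name: the statement is the Claim_ definition above) =====
theorem group_em_spec : Claim_equal_group_em := by
  intro lines keys items _ _
  show group_em lines keys items = group_em_alt lines keys items
  have hgoal : group_em lines keys items =
      (List.foldl (fun (new : PySem.Dict String (List String)) line =>
        let new_line := (PySem.Str.split? line ",").getD []
        let k := PySem.List.pyGetD new_line ((PySem.Int.ofStr? keys).getD 0) ""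
        let new := if new.contains k then new else new.insert k []
        if new.contains k then
          new.modify k [] (fun l => l ++ [PySem.List.pyGetD new_line ((PySem.Int.ofStr? items).getD 0) ""])
        else new) PySem.Dict.empty lines).items := rfl
  have hgoal' : group_em_alt lines keys items =
      (List.foldl
        (fun (out : PySem.Dict String (List String)) r =>
          out.insert (PySem.List.pyGetD r ((PySem.Int.ofStr? keys).getD 0) "")
            (List.map (fun s => PySem.List.pyGetD s ((PySem.Int.ofStr? items).getD 0) "")
              (List.filter
                (fun s => PySem.List.pyGetD s ((PySem.Int.ofStr? keys).getD 0) "" ==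
                  PySem.List.pyGetD r ((PySem.Int.ofStr? keys).getD 0) "")
                (List.map (fun line => (PySem.Str.split? line ",").getD []) lines))))
        PySem.Dict.empty
        (List.map (fun line => (PySem.Str.split? line ",").getD []) lines)).items := rfl
  rw [hgoal, hgoal']
  have hstep : (fun (new : PySem.Dict String (List String)) line =>
      let new_line := (PySem.Str.split? line ",").getD []
      let k := PySem.List.pyGetD new_line ((PySem.Int.ofStr? keys).getD 0) ""
      let new := if new.contains k then new else new.insert k []
      if new.contains k then
        new.modify k [] (fun l => l ++ [PySem.List.pyGetD new_line ((PySem.Int.ofStr? items).getD 0) ""])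
      else new) =
      (fun (d : PySem.Dict String (List String)) line =>
        d.modify (PySem.List.pyGetD ((PySem.Str.split? line ",").getD []) ((PySem.Int.ofStr? keys).getD 0) "") []
          (fun l => l ++ [PySem.List.pyGetD ((PySem.Str.split? line ",").getD []) ((PySem.Int.ofStr? items).getD 0) ""])) := by
    funext d line
    exact pv_stepA_eq_modify d _ _
  rw [hstep]
  have := pv_items_eq
    (fun r => PySem.List.pyGetD r ((PySem.Int.ofStr? keys).getD 0) "")
    (fun r => PySem.List.pyGetD r ((PySem.Int.ofStr? items).getD 0) "")
    (lines.map (fun line => (PySem.Str.split? line ",").getD []))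
  rw [List.foldl_map] at this
  exact this
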